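-- pv_equiv track=rewrite | github.com/mkluza/Python | Projekt zaliczeniowy/my_functions.py | my_fill
-- ===== SOURCE A (Python) =====
-- def my_fill(nr, string):
--     if len(string) < nr:
--         missing = nr - len(string)
--
--         for i in range(missing):
--             if i % 2 == 0:
--                 string = string + " "
--             if i % 2 == 1:
--                 string = " " + string
--     return string
-- ===== SOURCE B (Python) =====
-- def my_fill(nr, string):
--     if len(string) < nr:
--         m = nr - len(string)
--         return " " * (m // 2) + string + " " * (m - m // 2)
--     return string
-- ===== Notes on version B (the rewrite author's own statement) =====
-- stated objective: simpler
-- what changed: Replaces the alternating append/prepend character loop with a closed-form construction: floor(m/2) spaces on the left, the ceiling on the right.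
import Mathlib
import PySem

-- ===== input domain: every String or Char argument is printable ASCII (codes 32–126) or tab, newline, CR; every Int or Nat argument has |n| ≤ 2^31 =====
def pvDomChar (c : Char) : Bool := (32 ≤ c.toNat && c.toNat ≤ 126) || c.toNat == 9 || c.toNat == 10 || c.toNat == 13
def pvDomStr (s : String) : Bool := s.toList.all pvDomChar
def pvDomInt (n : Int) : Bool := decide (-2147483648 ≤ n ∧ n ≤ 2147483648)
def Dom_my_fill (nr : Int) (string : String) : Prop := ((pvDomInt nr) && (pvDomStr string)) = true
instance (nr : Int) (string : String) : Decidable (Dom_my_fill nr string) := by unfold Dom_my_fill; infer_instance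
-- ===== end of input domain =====

-- B replaces A's alternating append/prepend loop by a closed-form padding (floor(m/2) left, ceiling right): simpler and linear.

-- ===== PORT A =====
-- one iteration of A's loop body (the two sequential `if`s), on the string as a char list
def myFillStep (cs : List Char) (i : Int) : List Char :=
  let cs1 := if PySem.Int.mod i 2 = 0 then cs ++ [' '] else cs
  if PySem.Int.mod i 2 = 1 then ' ' :: cs1 else cs1

def my_fill (nr : Int) (string : String) : String :=
  if PySem.Str.len string < nr then
    let missing := nr - PySem.Str.len string
    String.ofList ((PySem.List.pyRange 0 missing 1).foldl myFillStep string.toList)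
  else string

-- ===== PORT B =====
def my_fill_alt (nr : Int) (string : String) : String :=
  if PySem.Str.len string < nr then
    let m := nr - PySem.Str.len string
    String.ofList (List.replicate (PySem.Int.floordiv m 2).toNat ' ' ++ string.toList
               ++ List.replicate (m - PySem.Int.floordiv m 2).toNat ' ')
  else string

-- ===== PRECONDITION & SPEC =====
def Spec_my_fill (nr : Int) (string : String) (out : String) : Prop := out = my_fill_alt nr string
instance (nr : Int) (string : String) (out : String) : Decidable (Spec_my_fill nr string out) := by unfold Spec_my_fill; infer_instance

-- ===== CLAIM (what is proved, stated in full; the proofs are below) =====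
def Claim_equal_my_fill : Prop := ∀ (nr : Int) (string : String), Dom_my_fill nr string → Spec_my_fill nr string (my_fill nr string)

-- ===== LEMMAS AND PROOFS =====

lemma myFillLoop_eq (n : Nat) (cs : List Char) :
    (PySem.List.pyRange 0 (n : Int) 1).foldl myFillStep cs
      = List.replicate (n / 2) ' ' ++ cs ++ List.replicate (n - n / 2) ' ' := by
  induction n with
  | zero => simp [PySem.List.pyRange]
  | succ n ih =>
      have hsplit : PySem.List.pyRange 0 ((n + 1 : Nat) : Int) 1
          = PySem.List.pyRange 0 (n : Int) 1 ++ PySem.List.pyRange (n : Int) ((n + 1 : Nat) : Int) 1 := by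
        exact PySem.List.pyRange_one_append 0 (n : Int) ((n + 1 : Nat) : Int) (by positivity) (by push_cast; omega)
      have hone : PySem.List.pyRange (n : Int) ((n + 1 : Nat) : Int) 1 = [(n : Int)] := by
        rw [PySem.List.pyRange_one_cons (by push_cast; omega : (n : Int) < ((n + 1 : Nat) : Int))]
        have : PySem.List.pyRange ((n : Int) + 1) ((n + 1 : Nat) : Int) 1 = [] := by
          simp [PySem.List.pyRange]
        rw [this]
      rw [hsplit, hone, List.foldl_append, ih]
      simp only [List.foldl_cons, List.foldl_nil]
      rcases Nat.even_or_odd n with he | ho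
      · have h2 : n % 2 = 0 := Nat.even_iff.mp he
        have h0 : PySem.Int.mod (n : Int) 2 = 0 := by simp [PySem.Int.mod, Int.fmod_eq_emod]; omega
        have hs : myFillStep (List.replicate (n / 2) ' ' ++ cs ++ List.replicate (n - n / 2) ' ') (n : Int)
            = List.replicate (n / 2) ' ' ++ cs ++ (List.replicate (n - n / 2) ' ' ++ [' ']) := by
          simp only [myFillStep, h0]
          norm_num
        rw [hs, ← List.replicate_succ' (n := n - n / 2)]
        have e2 : n + 1 - (n + 1) / 2 = n - n / 2 + 1 := by omega
        have e1 : (n + 1) / 2 = n / 2 := by omega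
        rw [e2, e1]
      · have h2 : n % 2 = 1 := Nat.odd_iff.mp ho
        have h1 : PySem.Int.mod (n : Int) 2 = 1 := by simp [PySem.Int.mod, Int.fmod_eq_emod]; omega
        have hs : myFillStep (List.replicate (n / 2) ' ' ++ cs ++ List.replicate (n - n / 2) ' ') (n : Int)
            = ' ' :: (List.replicate (n / 2) ' ' ++ cs ++ List.replicate (n - n / 2) ' ') := by
          simp only [myFillStep, h1]
          norm_num
        rw [hs]
        have e2 : n + 1 - (n + 1) / 2 = n - n / 2 := by omega
        have e1 : (n + 1) / 2 = n / 2 + 1 := by omega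
        rw [e2, e1, List.replicate_succ]
        simp

lemma floordiv_two_natCast (n : Nat) :
    PySem.Int.floordiv (n : Int) 2 = ((n / 2 : Nat) : Int) := by
  simp [PySem.Int.floordiv, Int.fdiv_eq_ediv]

-- ===== VERDICT (by name: the statement is the Claim_ definition above) =====
theorem my_fill_spec : Claim_equal_my_fill := by
  intro nr string _
  unfold Spec_my_fill my_fill my_fill_alt
  by_cases h : PySem.Str.len string < nr
  · simp only [h, if_pos]
    set m : Int := nr - PySem.Str.len string with hm
    have hmpos : 0 < m := by omega
    obtain ⟨n, hn⟩ : ∃ n : Nat, m = (n : Int) := ⟨m.toNat, (Int.toNat_of_nonneg hmpos.le).symm⟩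
    rw [hn, myFillLoop_eq, floordiv_two_natCast]
    have e1 : (((n / 2 : Nat) : Int)).toNat = n / 2 := by omega
    have e2 : ((n : Int) - ((n / 2 : Nat) : Int)).toNat = n - n / 2 := by omega
    rw [e1, e2]
  · simp only [if_neg h]
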